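-- pv_equiv track=rewrite | github.com/GarrettXUPT/papper | verionCon/booleanFunctionVersion1/nonAbsoluteIndicator.py | NineVarsAddMol
-- ===== SOURCE A (Python) =====
-- def NineVarsAddMol(dicOfw):
--     dicOfValue = {"x1" : 0, "x2" : 0, "x3" : 0, "x4" : 0, "x5" : 0, "x6" : 0, "x7" : 0, "x8" : 0, "x9" : 0}
--     resList = []
--     lstOfw = list(dicOfw.values())
--     for i1 in range(0, 2):
--         for i2 in range(0, 2):
--             for i3 in range(0, 2):
--                 for i4 in range(0, 2):
--                     for i5 in range(0, 2):
--                         for i6 in range(0, 2):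
--                             for i7 in range(0, 2):
--                                 for i8 in range(0, 2):
--                                     for i9 in range(0, 2):
--                                         dicOfValue["x1"] = i1
--                                         dicOfValue["x2"] = i2
--                                         dicOfValue["x3"] = i3
--                                         dicOfValue["x4"] = i4
--                                         dicOfValue["x5"] = i5
--                                         dicOfValue["x6"] = i6
--                                         dicOfValue["x7"] = i7
--                                         dicOfValue["x8"] = i8
--                                         dicOfValue["x9"] = i9
--                                         lstOfValue = list(dicOfValue.values())
--                                         for i in range(len(dicOfw)):
--                                             resList.append((lstOfw[i] + lstOfValue[i]) % 2)
--     return resList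
-- ===== SOURCE B (Python) =====
-- def NineVarsAddMol(dicOfw):
--     vals = list(dicOfw.values())
--     out = []
--     for n in range(512):
--         bits = [(n >> (8 - k)) & 1 for k in range(9)]
--         out.extend((w + b) % 2 for w, b in zip(vals, bits))
--     return out
-- ===== Notes on version B (the rewrite author's own statement) =====
-- stated objective: simpler
-- what changed: Replaces the nine nested 0/1 loops and the mutated 9-key dict with a single loop over n in range(512) that extracts the 9 bits of n arithmetically (MSB first) and zips them with the weight values.
import Mathlib
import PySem

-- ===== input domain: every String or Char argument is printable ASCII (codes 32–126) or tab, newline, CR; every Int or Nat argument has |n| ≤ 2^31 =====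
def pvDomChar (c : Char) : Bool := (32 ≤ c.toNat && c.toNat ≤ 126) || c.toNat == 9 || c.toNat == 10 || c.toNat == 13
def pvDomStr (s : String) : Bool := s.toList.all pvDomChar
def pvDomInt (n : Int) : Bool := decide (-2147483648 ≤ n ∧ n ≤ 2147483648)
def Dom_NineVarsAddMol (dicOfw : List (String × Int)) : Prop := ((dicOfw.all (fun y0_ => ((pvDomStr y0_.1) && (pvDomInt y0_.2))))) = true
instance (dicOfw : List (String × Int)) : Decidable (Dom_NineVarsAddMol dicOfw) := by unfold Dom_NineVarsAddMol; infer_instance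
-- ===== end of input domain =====

-- B replaces the nine nested 0/1 loops and the per-iteration dict mutation with one loop over
-- n in range(512), extracting the 9 bits of n arithmetically (MSB first); objective: simpler.

-- ===== PORT A =====
def pvAbody9 (lstOfw : List Int) (lenOfw : Nat) (i1 i2 i3 i4 i5 i6 i7 i8 : Int) :
    PySem.Dict String Int × List Int → Int → PySem.Dict String Int × List Int :=
  fun st9 i9 =>
    let d := ((((((((st9.1.insert "x1" i1).insert "x2" i2).insert "x3" i3).insert
      "x4" i4).insert "x5" i5).insert "x6" i6).insert "x7" i7).insert
      "x8" i8).insert "x9" i9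
    let lstOfValue := d.values
    let res := (PySem.List.pyRange 0 (lenOfw : Int) 1).foldl
      (fun r i => r ++ [PySem.Int.mod
        (PySem.List.pyGetD lstOfw i 0 + PySem.List.pyGetD lstOfValue i 0) 2]) st9.2
    (d, res)
def pvAbody8 (lstOfw : List Int) (lenOfw : Nat) (i1 i2 i3 i4 i5 i6 i7 : Int) :
    PySem.Dict String Int × List Int → Int → PySem.Dict String Int × List Int :=
  fun st8 i8 => List.foldl (pvAbody9 lstOfw lenOfw i1 i2 i3 i4 i5 i6 i7 i8) st8 (PySem.List.pyRange 0 2 1)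
def pvAbody7 (lstOfw : List Int) (lenOfw : Nat) (i1 i2 i3 i4 i5 i6 : Int) :
    PySem.Dict String Int × List Int → Int → PySem.Dict String Int × List Int :=
  fun st7 i7 => List.foldl (pvAbody8 lstOfw lenOfw i1 i2 i3 i4 i5 i6 i7) st7 (PySem.List.pyRange 0 2 1)
def pvAbody6 (lstOfw : List Int) (lenOfw : Nat) (i1 i2 i3 i4 i5 : Int) :
    PySem.Dict String Int × List Int → Int → PySem.Dict String Int × List Int :=
  fun st6 i6 => List.foldl (pvAbody7 lstOfw lenOfw i1 i2 i3 i4 i5 i6) st6 (PySem.List.pyRange 0 2 1)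
def pvAbody5 (lstOfw : List Int) (lenOfw : Nat) (i1 i2 i3 i4 : Int) :
    PySem.Dict String Int × List Int → Int → PySem.Dict String Int × List Int :=
  fun st5 i5 => List.foldl (pvAbody6 lstOfw lenOfw i1 i2 i3 i4 i5) st5 (PySem.List.pyRange 0 2 1)
def pvAbody4 (lstOfw : List Int) (lenOfw : Nat) (i1 i2 i3 : Int) :
    PySem.Dict String Int × List Int → Int → PySem.Dict String Int × List Int :=
  fun st4 i4 => List.foldl (pvAbody5 lstOfw lenOfw i1 i2 i3 i4) st4 (PySem.List.pyRange 0 2 1)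
def pvAbody3 (lstOfw : List Int) (lenOfw : Nat) (i1 i2 : Int) :
    PySem.Dict String Int × List Int → Int → PySem.Dict String Int × List Int :=
  fun st3 i3 => List.foldl (pvAbody4 lstOfw lenOfw i1 i2 i3) st3 (PySem.List.pyRange 0 2 1)
def pvAbody2 (lstOfw : List Int) (lenOfw : Nat) (i1 : Int) :
    PySem.Dict String Int × List Int → Int → PySem.Dict String Int × List Int :=
  fun st2 i2 => List.foldl (pvAbody3 lstOfw lenOfw i1 i2) st2 (PySem.List.pyRange 0 2 1)
def pvAbody1 (lstOfw : List Int) (lenOfw : Nat) :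
    PySem.Dict String Int × List Int → Int → PySem.Dict String Int × List Int :=
  fun st1 i1 => List.foldl (pvAbody2 lstOfw lenOfw i1) st1 (PySem.List.pyRange 0 2 1)

def NineVarsAddMol (dicOfw : List (String × Int)) : List Int :=
  let dicOfValue : PySem.Dict String Int :=
    PySem.Dict.ofList [("x1", 0), ("x2", 0), ("x3", 0), ("x4", 0), ("x5", 0),
                       ("x6", 0), ("x7", 0), ("x8", 0), ("x9", 0)]
  let lstOfw := (PySem.Dict.ofList dicOfw).values
  let lenOfw := (PySem.Dict.ofList dicOfw).size
  (List.foldl (pvAbody1 lstOfw lenOfw) (dicOfValue, ([] : List Int)) (PySem.List.pyRange 0 2 1)).2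

-- ===== PORT B =====
def NineVarsAddMol_alt (dicOfw : List (String × Int)) : List Int :=
  let vals := (PySem.Dict.ofList dicOfw).values
  (PySem.List.pyRange 0 512 1).foldl (fun out n =>
    let bits := (PySem.List.pyRange 0 9 1).map (fun k => PySem.Int.band (n >>> (8 - k).toNat) 1)
    out ++ (vals.zip bits).map (fun wb => PySem.Int.mod (wb.1 + wb.2) 2)) []

-- ===== PRECONDITION & SPEC =====
-- Pre_ excludes dicts with more than 9 (distinct) keys, on which Python A raises IndexError
-- (it indexes the 9-element truth-value list lstOfValue at positions up to len(dicOfw) - 1).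
def Pre_NineVarsAddMol (dicOfw : List (String × Int)) : Prop :=
  (PySem.Dict.ofList dicOfw).size ≤ 9
instance (dicOfw : List (String × Int)) : Decidable (Pre_NineVarsAddMol dicOfw) := by
  unfold Pre_NineVarsAddMol; infer_instance
def pvWitness_NineVarsAddMol : (List (String × Int)) := [("a", 1), ("b", 0)]

def Spec_NineVarsAddMol (dicOfw : List (String × Int)) (out : List Int) : Prop := out = NineVarsAddMol_alt dicOfw
instance (dicOfw : List (String × Int)) (out : List Int) : Decidable (Spec_NineVarsAddMol dicOfw out) := by unfold Spec_NineVarsAddMol; infer_instance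

-- ===== CLAIM (what is proved, stated in full; the proofs are below) =====
def Claim_equal_NineVarsAddMol : Prop := ∀ (dicOfw : List (String × Int)), Dom_NineVarsAddMol dicOfw → Pre_NineVarsAddMol dicOfw → Spec_NineVarsAddMol dicOfw (NineVarsAddMol dicOfw)

-- ===== LEMMAS AND PROOFS =====

-- A's inner append loop, as a function of the accumulated list and the truth-value vector
def pvG (vals : List Int) (sz : Nat) (res v : List Int) : List Int :=
  (PySem.List.pyRange 0 (sz : Int) 1).foldl
    (fun r i => r ++ [PySem.Int.mod (PySem.List.pyGetD vals i 0 + PySem.List.pyGetD v i 0) 2]) res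

-- the canonical 9-key dict A's mutated dict always has the shape of
def pvDc (a1 a2 a3 a4 a5 a6 a7 a8 a9 : Int) : PySem.Dict String Int :=
  PySem.Dict.mk [("x1", a1), ("x2", a2), ("x3", a3), ("x4", a4), ("x5", a5),
                 ("x6", a6), ("x7", a7), ("x8", a8), ("x9", a9)]

-- all 0/1 completions of a prefix, n more coordinates, 0 before 1 (A's iteration order)
def pvExt : Nat → List Int → List (List Int)
  | 0, pre => [pre]
  | n + 1, pre => pvExt n (pre ++ [0]) ++ pvExt n (pre ++ [1])

def pvCoreB (vals : List Int) (vecs : List (List Int)) : List Int :=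
  vecs.foldl (fun out bits => out ++ (vals.zip bits).map (fun wb => PySem.Int.mod (wb.1 + wb.2) 2)) []

def pvVecsB : List (List Int) :=
  (PySem.List.pyRange 0 512 1).map (fun n =>
    (PySem.List.pyRange 0 9 1).map (fun k => PySem.Int.band (n >>> (8 - k).toNat) 1))

set_option maxHeartbeats 2000000 in
theorem pvIns (a1 a2 a3 a4 a5 a6 a7 a8 a9 i1 i2 i3 i4 i5 i6 i7 i8 i9 : Int) :
    (((((((((pvDc a1 a2 a3 a4 a5 a6 a7 a8 a9).insert "x1" i1).insert "x2" i2).insert "x3" i3).insert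
      "x4" i4).insert "x5" i5).insert "x6" i6).insert "x7" i7).insert
      "x8" i8).insert "x9" i9 = pvDc i1 i2 i3 i4 i5 i6 i7 i8 i9 := rfl

set_option maxHeartbeats 2000000 in
theorem pvL9 (vals : List Int) (sz : Nat) (i1 i2 i3 i4 i5 i6 i7 i8 a1 a2 a3 a4 a5 a6 a7 a8 a9 : Int) (res : List Int) :
    List.foldl (pvAbody9 vals sz i1 i2 i3 i4 i5 i6 i7 i8) (pvDc a1 a2 a3 a4 a5 a6 a7 a8 a9, res) (PySem.List.pyRange 0 2 1)
    = (pvDc i1 i2 i3 i4 i5 i6 i7 i8 1, List.foldl (pvG vals sz) res (pvExt 1 [i1, i2, i3, i4, i5, i6, i7, i8])) := by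
  rw [show PySem.List.pyRange 0 2 1 = [0, 1] from rfl]
  simp only [List.foldl_cons, List.foldl_nil, pvAbody9]
  rw [pvIns, pvIns]
  rfl

theorem pvL8 (vals : List Int) (sz : Nat) (i1 i2 i3 i4 i5 i6 i7 a1 a2 a3 a4 a5 a6 a7 a8 a9 : Int) (res : List Int) :
    List.foldl (pvAbody8 vals sz i1 i2 i3 i4 i5 i6 i7) (pvDc a1 a2 a3 a4 a5 a6 a7 a8 a9, res) (PySem.List.pyRange 0 2 1)
    = (pvDc i1 i2 i3 i4 i5 i6 i7 1 1, List.foldl (pvG vals sz) res (pvExt 2 [i1, i2, i3, i4, i5, i6, i7])) := by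
  rw [show PySem.List.pyRange 0 2 1 = [0, 1] from rfl]
  simp only [List.foldl_cons, List.foldl_nil, pvAbody8]
  rw [pvL9, pvL9]
  rw [show (pvExt 2 [i1, i2, i3, i4, i5, i6, i7] : List (List Int)) = pvExt 1 [i1, i2, i3, i4, i5, i6, i7, 0] ++ pvExt 1 [i1, i2, i3, i4, i5, i6, i7, 1] from rfl]
  rw [List.foldl_append]

theorem pvL7 (vals : List Int) (sz : Nat) (i1 i2 i3 i4 i5 i6 a1 a2 a3 a4 a5 a6 a7 a8 a9 : Int) (res : List Int) :
    List.foldl (pvAbody7 vals sz i1 i2 i3 i4 i5 i6) (pvDc a1 a2 a3 a4 a5 a6 a7 a8 a9, res) (PySem.List.pyRange 0 2 1)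
    = (pvDc i1 i2 i3 i4 i5 i6 1 1 1, List.foldl (pvG vals sz) res (pvExt 3 [i1, i2, i3, i4, i5, i6])) := by
  rw [show PySem.List.pyRange 0 2 1 = [0, 1] from rfl]
  simp only [List.foldl_cons, List.foldl_nil, pvAbody7]
  rw [pvL8, pvL8]
  rw [show (pvExt 3 [i1, i2, i3, i4, i5, i6] : List (List Int)) = pvExt 2 [i1, i2, i3, i4, i5, i6, 0] ++ pvExt 2 [i1, i2, i3, i4, i5, i6, 1] from rfl]
  rw [List.foldl_append]

theorem pvL6 (vals : List Int) (sz : Nat) (i1 i2 i3 i4 i5 a1 a2 a3 a4 a5 a6 a7 a8 a9 : Int) (res : List Int) :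
    List.foldl (pvAbody6 vals sz i1 i2 i3 i4 i5) (pvDc a1 a2 a3 a4 a5 a6 a7 a8 a9, res) (PySem.List.pyRange 0 2 1)
    = (pvDc i1 i2 i3 i4 i5 1 1 1 1, List.foldl (pvG vals sz) res (pvExt 4 [i1, i2, i3, i4, i5])) := by
  rw [show PySem.List.pyRange 0 2 1 = [0, 1] from rfl]
  simp only [List.foldl_cons, List.foldl_nil, pvAbody6]
  rw [pvL7, pvL7]
  rw [show (pvExt 4 [i1, i2, i3, i4, i5] : List (List Int)) = pvExt 3 [i1, i2, i3, i4, i5, 0] ++ pvExt 3 [i1, i2, i3, i4, i5, 1] from rfl]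
  rw [List.foldl_append]

theorem pvL5 (vals : List Int) (sz : Nat) (i1 i2 i3 i4 a1 a2 a3 a4 a5 a6 a7 a8 a9 : Int) (res : List Int) :
    List.foldl (pvAbody5 vals sz i1 i2 i3 i4) (pvDc a1 a2 a3 a4 a5 a6 a7 a8 a9, res) (PySem.List.pyRange 0 2 1)
    = (pvDc i1 i2 i3 i4 1 1 1 1 1, List.foldl (pvG vals sz) res (pvExt 5 [i1, i2, i3, i4])) := by
  rw [show PySem.List.pyRange 0 2 1 = [0, 1] from rfl]
  simp only [List.foldl_cons, List.foldl_nil, pvAbody5]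
  rw [pvL6, pvL6]
  rw [show (pvExt 5 [i1, i2, i3, i4] : List (List Int)) = pvExt 4 [i1, i2, i3, i4, 0] ++ pvExt 4 [i1, i2, i3, i4, 1] from rfl]
  rw [List.foldl_append]

theorem pvL4 (vals : List Int) (sz : Nat) (i1 i2 i3 a1 a2 a3 a4 a5 a6 a7 a8 a9 : Int) (res : List Int) :
    List.foldl (pvAbody4 vals sz i1 i2 i3) (pvDc a1 a2 a3 a4 a5 a6 a7 a8 a9, res) (PySem.List.pyRange 0 2 1)
    = (pvDc i1 i2 i3 1 1 1 1 1 1, List.foldl (pvG vals sz) res (pvExt 6 [i1, i2, i3])) := by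
  rw [show PySem.List.pyRange 0 2 1 = [0, 1] from rfl]
  simp only [List.foldl_cons, List.foldl_nil, pvAbody4]
  rw [pvL5, pvL5]
  rw [show (pvExt 6 [i1, i2, i3] : List (List Int)) = pvExt 5 [i1, i2, i3, 0] ++ pvExt 5 [i1, i2, i3, 1] from rfl]
  rw [List.foldl_append]

theorem pvL3 (vals : List Int) (sz : Nat) (i1 i2 a1 a2 a3 a4 a5 a6 a7 a8 a9 : Int) (res : List Int) :
    List.foldl (pvAbody3 vals sz i1 i2) (pvDc a1 a2 a3 a4 a5 a6 a7 a8 a9, res) (PySem.List.pyRange 0 2 1)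
    = (pvDc i1 i2 1 1 1 1 1 1 1, List.foldl (pvG vals sz) res (pvExt 7 [i1, i2])) := by
  rw [show PySem.List.pyRange 0 2 1 = [0, 1] from rfl]
  simp only [List.foldl_cons, List.foldl_nil, pvAbody3]
  rw [pvL4, pvL4]
  rw [show (pvExt 7 [i1, i2] : List (List Int)) = pvExt 6 [i1, i2, 0] ++ pvExt 6 [i1, i2, 1] from rfl]
  rw [List.foldl_append]

theorem pvL2 (vals : List Int) (sz : Nat) (i1 a1 a2 a3 a4 a5 a6 a7 a8 a9 : Int) (res : List Int) :
    List.foldl (pvAbody2 vals sz i1) (pvDc a1 a2 a3 a4 a5 a6 a7 a8 a9, res) (PySem.List.pyRange 0 2 1)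
    = (pvDc i1 1 1 1 1 1 1 1 1, List.foldl (pvG vals sz) res (pvExt 8 [i1])) := by
  rw [show PySem.List.pyRange 0 2 1 = [0, 1] from rfl]
  simp only [List.foldl_cons, List.foldl_nil, pvAbody2]
  rw [pvL3, pvL3]
  rw [show (pvExt 8 [i1] : List (List Int)) = pvExt 7 [i1, 0] ++ pvExt 7 [i1, 1] from rfl]
  rw [List.foldl_append]

def pvVecsL : List (List Int) := pvExt 8 [0]
def pvVecsR : List (List Int) := pvExt 8 [1]

theorem pvL1 (vals : List Int) (sz : Nat) (a1 a2 a3 a4 a5 a6 a7 a8 a9 : Int) (res : List Int)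
    (E0 E1 : List (List Int)) (h0 : pvExt 8 [0] = E0) (h1 : pvExt 8 [1] = E1) :
    List.foldl (pvAbody1 vals sz) (pvDc a1 a2 a3 a4 a5 a6 a7 a8 a9, res) (PySem.List.pyRange 0 2 1)
    = (pvDc 1 1 1 1 1 1 1 1 1, List.foldl (pvG vals sz) (List.foldl (pvG vals sz) res E0) E1) := by
  rw [show PySem.List.pyRange 0 2 1 = [0, 1] from rfl]
  rw [List.foldl_cons, List.foldl_cons, List.foldl_nil]
  rw [show ∀ (st : PySem.Dict String Int × List Int) (i : Int),
        pvAbody1 vals sz st i = List.foldl (pvAbody2 vals sz i) st (PySem.List.pyRange 0 2 1)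
      from fun _ _ => rfl]
  rw [show ∀ (st : PySem.Dict String Int × List Int) (i : Int),
        pvAbody1 vals sz st i = List.foldl (pvAbody2 vals sz i) st (PySem.List.pyRange 0 2 1)
      from fun _ _ => rfl]
  rw [pvL2, pvL2, h0, h1]

def pvVecsA : List (List Int) :=
  [0, 1].flatMap (fun i1 => [0, 1].flatMap (fun i2 => [0, 1].flatMap (fun i3 =>
    [0, 1].flatMap (fun i4 => [0, 1].flatMap (fun i5 => [0, 1].flatMap (fun i6 =>
      [0, 1].flatMap (fun i7 => [0, 1].flatMap (fun i8 => [0, 1].map (fun i9 =>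
        ([i1, i2, i3, i4, i5, i6, i7, i8, i9] : List Int))))))))))

set_option maxRecDepth 8000 in
theorem pvCat : pvVecsL ++ pvVecsR = pvVecsA := by decide

set_option maxRecDepth 8000 in
theorem pvVecs_eq : pvVecsA = pvVecsB := by decide

set_option maxHeartbeats 2000000 in
theorem pvA_eq_fold (dicOfw : List (String × Int)) :
    NineVarsAddMol dicOfw
    = List.foldl (pvG ((PySem.Dict.ofList dicOfw).values) ((PySem.Dict.ofList dicOfw).size))
        (List.foldl (pvG ((PySem.Dict.ofList dicOfw).values) ((PySem.Dict.ofList dicOfw).size)) [] pvVecsL)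
        pvVecsR := by
  have h0 : NineVarsAddMol dicOfw
      = (List.foldl (pvAbody1 ((PySem.Dict.ofList dicOfw).values) ((PySem.Dict.ofList dicOfw).size))
          (pvDc 0 0 0 0 0 0 0 0 0, ([] : List Int)) (PySem.List.pyRange 0 2 1)).2 := rfl
  rw [h0, pvL1 _ _ _ _ _ _ _ _ _ _ _ _ pvVecsL pvVecsR rfl rfl]

set_option maxRecDepth 8000 in
theorem pvB_eq_core (dicOfw : List (String × Int)) :
    NineVarsAddMol_alt dicOfw = pvCoreB ((PySem.Dict.ofList dicOfw).values) pvVecsB := by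
  unfold NineVarsAddMol_alt pvCoreB pvVecsB
  rw [List.foldl_map]

theorem pv_size_eq_length (dicOfw : List (String × Int)) :
    (PySem.Dict.ofList dicOfw).size = ((PySem.Dict.ofList dicOfw).values).length := by
  simp [PySem.Dict.size, PySem.Dict.values]

theorem pv_inner_eq (vals v r : List Int) (h : vals.length ≤ v.length) :
    pvG vals vals.length r v
    = r ++ (vals.zip v).map (fun wb => PySem.Int.mod (wb.1 + wb.2) 2) := by
  unfold pvG
  rw [PySem.List.foldl_append_singleton_eq_map]
  congr 1
  rw [PySem.List.pyRange_one]
  simp only [sub_zero, Int.toNat_natCast, List.map_map]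
  apply List.ext_getElem
  · simp [List.length_zip, Nat.min_eq_left h]
  · intro j hj1 hj2
    simp only [List.getElem_map, List.getElem_range, List.getElem_zip, Function.comp_apply]
    have hjv : j < vals.length := by simpa using hj1
    rw [show ((0 : Int) + (j : Int)) = ((j : Nat) : Int) by ring]
    rw [PySem.List.pyGetD_natCast, PySem.List.pyGetD_natCast]
    rw [List.getD_eq_getElem _ _ hjv, List.getD_eq_getElem _ _ (lt_of_lt_of_le hjv h)]

theorem pv_core_eq (vals : List Int) (vecs : List (List Int)) (h9 : vals.length ≤ 9)
    (hv : ∀ v ∈ vecs, v.length = 9) :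
    List.foldl (pvG vals vals.length) [] vecs = pvCoreB vals vecs := by
  unfold pvCoreB
  induction vecs using List.reverseRecOn with
  | nil => rfl
  | append_singleton vs v ih =>
    rw [List.foldl_append, List.foldl_append]
    simp only [List.foldl_cons, List.foldl_nil]
    rw [ih (fun u hu => hv u (List.mem_append_left _ hu))]
    exact pv_inner_eq vals v _ (by rw [hv v (List.mem_append_right _ (List.mem_singleton_self v))]; exact h9)

-- ===== VERDICT (by name: the statement is the Claim_ definition above) =====
theorem NineVarsAddMol_spec : Claim_equal_NineVarsAddMol := by
  intro dicOfw _ hpre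
  unfold Spec_NineVarsAddMol
  rw [pvA_eq_fold, ← List.foldl_append, pvCat, pvVecs_eq, pvB_eq_core, pv_size_eq_length]
  apply pv_core_eq
  · rw [← pv_size_eq_length]; exact hpre
  · intro v hv
    unfold pvVecsB at hv
    simp only [List.mem_map] at hv
    obtain ⟨n, _, rfl⟩ := hv
    simp [PySem.List.length_pyRange_one]
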